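-- pv_equiv track=rewrite | github.com/noahfoe/Matroid-Theory-Project | TestMatroidTheory.py | checkFEP
-- ===== SOURCE A (Python) =====
-- def checkFEP(A, B, C):
--     for a in A:
--         for b in B:
--             if (b in A) or (a in B):
--                 continue
--             test = A.difference(set([a])).union(set([b]))
--             if test in C:
--                 return True
--     return False
-- ===== SOURCE B (Python) =====
-- def checkFEP(A, B, C):
--     # Faster: scan C once; c is reachable by a single swap iff A-c and c-A are singletons {a},{b} with a not in B, b in B.
--     for c in C:
--         only_a = A - c
--         if len(only_a) != 1:
--             continue
--         only_c = c - A
--         if len(only_c) != 1: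
--             continue
--         (a,) = only_a
--         (b,) = only_c
--         if a not in B and b in B:
--             return True
--     return False
-- ===== Notes on version B (the rewrite author's own statement) =====
-- stated objective: faster
-- what changed: Instead of enumerating all swap pairs (a,b) from A×B and testing each resulting set against C, B scans C once and checks whether each candidate c is a single-element swap of A via the two set differences A-c and c-A.
import Mathlib
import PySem

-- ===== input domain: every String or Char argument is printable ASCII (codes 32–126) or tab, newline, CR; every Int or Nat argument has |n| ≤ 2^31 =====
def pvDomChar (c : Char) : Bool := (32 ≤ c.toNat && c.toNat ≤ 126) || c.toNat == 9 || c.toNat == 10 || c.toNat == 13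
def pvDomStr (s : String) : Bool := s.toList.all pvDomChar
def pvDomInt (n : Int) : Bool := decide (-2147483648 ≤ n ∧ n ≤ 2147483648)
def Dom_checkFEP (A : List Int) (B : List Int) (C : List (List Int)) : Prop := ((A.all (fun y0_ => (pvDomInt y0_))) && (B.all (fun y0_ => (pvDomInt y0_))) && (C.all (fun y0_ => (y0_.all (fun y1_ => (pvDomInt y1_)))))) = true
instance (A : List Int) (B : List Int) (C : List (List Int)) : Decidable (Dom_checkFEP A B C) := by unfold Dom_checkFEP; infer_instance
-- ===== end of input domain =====

-- B replaces A's scan over all candidate swap pairs (a,b) ∈ A×B by a single scan of C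
-- testing each c as a one-element swap of A via the set differences A-c and c-A (faster).


-- ===== PORT A =====
def checkFEP (A : List Int) (B : List Int) (C : List (List Int)) : Bool :=
  A.any fun a =>
    B.any fun b =>
      if PySem.Set.contains A b || PySem.Set.contains B a then false
      else
        C.any fun c =>
          PySem.Set.equal
            (PySem.Set.union (PySem.Set.diff A (PySem.Set.ofList [a])) (PySem.Set.ofList [b])) c

-- ===== PORT B =====
-- one C-candidate test: A-c and c-A must be singletons {a},{b} with a ∉ B, b ∈ B
def swapHit (A : List Int) (B : List Int) (c : List Int) : Bool :=
  match PySem.Set.diff A c, PySem.Set.diff c A with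
  | [a], [b] => !(PySem.Set.contains B a) && PySem.Set.contains B b
  | _, _ => false

def checkFEP_alt (A : List Int) (B : List Int) (C : List (List Int)) : Bool :=
  C.any fun c => swapHit A B c

-- ===== PRECONDITION & SPEC =====
-- Python's A and the members of C are sets; under the type convention they are modelled as
-- duplicate-free lists. Pre_ states exactly that set invariant (it excludes no actual Python input).
def Pre_checkFEP (A : List Int) (B : List Int) (C : List (List Int)) : Prop :=
  A.Nodup ∧ ∀ c ∈ C, c.Nodup
instance (A : List Int) (B : List Int) (C : List (List Int)) : Decidable (Pre_checkFEP A B C) := by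
  unfold Pre_checkFEP; infer_instance

def pvWitness_checkFEP : List Int × List Int × List (List Int) := ([1], [2], [[2]])

def Spec_checkFEP (A : List Int) (B : List Int) (C : List (List Int)) (out : Bool) : Prop := out = checkFEP_alt A B C
instance (A : List Int) (B : List Int) (C : List (List Int)) (out : Bool) : Decidable (Spec_checkFEP A B C out) := by unfold Spec_checkFEP; infer_instance

-- ===== CLAIM (what is proved, stated in full; the proofs are below) =====
def Claim_equal_checkFEP : Prop := ∀ (A : List Int) (B : List Int) (C : List (List Int)), Dom_checkFEP A B C → Pre_checkFEP A B C → Spec_checkFEP A B C (checkFEP A B C)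

-- ===== LEMMAS AND PROOFS =====

-- a filter that keeps exactly one element of a duplicate-free list is that singleton
lemma filter_eq_singleton {p : Int → Bool} {A : List Int} {a : Int}
    (hnd : A.Nodup) (ha : a ∈ A) (h : ∀ x ∈ A, p x = true ↔ x = a) :
    A.filter p = [a] := by
  induction A with
  | nil => cases ha
  | cons x xs ih =>
    rcases List.nodup_cons.mp hnd with ⟨hx, hxs⟩
    by_cases hxa : x = a
    · subst hxa
      have hpx : p x = true := (h x (List.mem_cons_self)).mpr rfl
      have : xs.filter p = [] := by
        apply List.filter_eq_nil_iff.mpr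
        intro y hy
        intro hpy
        exact hx ((h y (List.mem_cons_of_mem _ hy)).mp hpy ▸ hy)
      simp [hpx, this]
    · have hax : a ∈ xs := by
        rcases List.mem_cons.mp ha with h' | h'
        · exact absurd h'.symm hxa
        · exact h'
      have hpx : p x = false := by
        by_contra hh
        exact hxa ((h x List.mem_cons_self).mp (by simpa using hh))
      rw [List.filter_cons_of_neg (by simp [hpx])]
      exact ih hxs hax (fun y hy => h y (List.mem_cons_of_mem _ hy))

-- per-candidate core: A's pair search hits c iff swapHit accepts c
lemma core_iff (A B c : List Int) (hA : A.Nodup) (hc : c.Nodup) :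
    (∃ a ∈ A, ∃ b ∈ B, b ∉ A ∧ a ∉ B ∧
        PySem.Set.equal
          (PySem.Set.union (PySem.Set.diff A (PySem.Set.ofList [a])) (PySem.Set.ofList [b])) c = true)
    ↔ swapHit A B c = true := by
  constructor
  · rintro ⟨a, haA, b, hbB, hbA, haB, heq⟩
    have H := (PySem.Set.equal_iff _ _).mp heq
    have Hmem : ∀ x : Int, ((x ∈ A ∧ x ≠ a) ∨ x = b) ↔ x ∈ c := by
      intro x
      have := H x
      simpa [PySem.Set.mem_union, PySem.Set.mem_diff] using this
    have hab : a ≠ b := fun h => hbA (h ▸ haA)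
    have hac : a ∉ c := by
      intro h
      rcases (Hmem a).mpr h with ⟨_, h'⟩ | h'
      · exact h' rfl
      · exact hab h'
    have hbc : b ∈ c := (Hmem b).mp (Or.inr rfl)
    have hdAc : PySem.Set.diff A c = [a] := by
      apply filter_eq_singleton hA haA
      intro x hx
      constructor
      · intro hpx
        have hxc : x ∉ c := by simpa using hpx
        by_contra hxa
        exact hxc ((Hmem x).mp (Or.inl ⟨hx, hxa⟩))
      · intro hxa; subst hxa; simpa using hac
    have hdcA : PySem.Set.diff c A = [b] := by
      apply filter_eq_singleton hc hbc
      intro x hx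
      constructor
      · intro hpx
        have hxA : x ∉ A := by simpa using hpx
        rcases (Hmem x).mpr hx with ⟨h', _⟩ | h'
        · exact absurd h' hxA
        · exact h'
      · intro hxb; subst hxb; simpa using hbA
    simp [swapHit, hdAc, hdcA, haB, hbB]
  · intro h
    unfold swapHit at h
    rcases hd : PySem.Set.diff A c with _ | ⟨a, ta⟩
    · rw [hd] at h; simp at h
    rcases hta : ta with _ | _
    · rcases he : PySem.Set.diff c A with _ | ⟨b, tb⟩
      · rw [hd, hta, he] at h; simp at h
      rcases htb : tb with _ | _
      · rw [hd, hta, he, htb] at h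
        simp only [Bool.and_eq_true, Bool.not_eq_true'] at h
        have haB : a ∉ B := by
          intro hm
          have := h.1
          rw [(PySem.Set.contains_iff B a).mpr hm] at this
          exact absurd this (by decide)
        have hbB : b ∈ B := (PySem.Set.contains_iff B b).mp h.2
        have ha : a ∈ PySem.Set.diff A c := by rw [hd, hta]; simp
        have hb : b ∈ PySem.Set.diff c A := by rw [he, htb]; simp
        have haA : a ∈ A := ((PySem.Set.mem_diff _ _ _).mp ha).1
        have hac : a ∉ c := ((PySem.Set.mem_diff _ _ _).mp ha).2
        have hbc : b ∈ c := ((PySem.Set.mem_diff _ _ _).mp hb).1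
        have hbA : b ∉ A := ((PySem.Set.mem_diff _ _ _).mp hb).2
        refine ⟨a, haA, b, hbB, hbA, haB, ?_⟩
        apply (PySem.Set.equal_iff _ _).mpr
        intro x
        simp only [PySem.Set.mem_union, PySem.Set.mem_diff]
        constructor
        · rintro (⟨hxA, hxa⟩ | hxb)
          · by_contra hxc
            have : x ∈ PySem.Set.diff A c := (PySem.Set.mem_diff _ _ _).mpr ⟨hxA, hxc⟩
            rw [hd, hta] at this
            simp at this hxa
            exact hxa (by simpa using this)
          · simp at hxb; exact hxb ▸ hbc
        · intro hxc
          by_cases hxA : x ∈ A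
          · have hxa : x ≠ a := fun hh => hac (hh ▸ hxc)
            exact Or.inl ⟨hxA, by simpa using hxa⟩
          · have : x ∈ PySem.Set.diff c A := (PySem.Set.mem_diff _ _ _).mpr ⟨hxc, hxA⟩
            rw [he, htb] at this
            exact Or.inr (by simpa using this)
      · rw [hd, hta, he, htb] at h; simp at h
    · rw [hd, hta] at h; simp at h

-- ===== VERDICT (by name: the statement is the Claim_ definition above) =====
theorem checkFEP_spec : Claim_equal_checkFEP := by
  intro A B C _ hPre
  unfold Spec_checkFEP
  rw [Bool.eq_iff_iff]
  unfold checkFEP checkFEP_alt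
  simp only [List.any_eq_true]
  constructor
  · rintro ⟨a, haA, b, hbB, h⟩
    by_cases hg : (PySem.Set.contains A b || PySem.Set.contains B a) = true
    · rw [if_pos hg] at h; exact absurd h (by simp)
    · rw [if_neg hg] at h
      rw [Bool.or_eq_true] at hg
      push_neg at hg
      have hbA : b ∉ A := fun hm => hg.1 ((PySem.Set.contains_iff A b).mpr hm)
      have haB : a ∉ B := fun hm => hg.2 ((PySem.Set.contains_iff B a).mpr hm)
      rcases List.any_eq_true.mp h with ⟨c, hcC, heq⟩
      exact ⟨c, hcC, (core_iff A B c hPre.1 (hPre.2 c hcC)).mp ⟨a, haA, b, hbB, hbA, haB, heq⟩⟩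
  · rintro ⟨c, hcC, hhit⟩
    rcases (core_iff A B c hPre.1 (hPre.2 c hcC)).mpr hhit with ⟨a, haA, b, hbB, hbA, haB, heq⟩
    refine ⟨a, haA, b, hbB, ?_⟩
    have hg : ¬((PySem.Set.contains A b || PySem.Set.contains B a) = true) := by
      rw [Bool.or_eq_true]
      rintro (hh | hh)
      · exact hbA ((PySem.Set.contains_iff A b).mp hh)
      · exact haB ((PySem.Set.contains_iff B a).mp hh)
    rw [if_neg hg]
    exact List.any_eq_true.mpr ⟨c, hcC, heq⟩
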